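-- pv_equiv track=rewrite | github.com/MrBrantCode/unitest_baseline | mut_generate/mist_train_taco/taco_5656/solution.py | count_possible_suspect_pairs
-- ===== SOURCE A (Python) =====
-- from collections import defaultdict
-- from bisect import bisect_left as lower
--
-- def count_possible_suspect_pairs(n, p, coders):
--     cnt = [0] * n
--     mp = defaultdict(int)
--     ans = [0] * n
--
--     for x, y in coders:
--         x -= 1
--         y -= 1
--         key = (min(x, y), max(x, y))
--         mp[key] += 1
--         cnt[x] += 1
--         cnt[y] += 1
--
--     for (x, y), val in mp.items():
--         if cnt[x] + cnt[y] >= p and cnt[x] + cnt[y] - val < p: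
--             ans[x] -= 1
--             ans[y] -= 1
--
--     scnt = cnt.copy()
--     scnt.sort()
--
--     for i in range(n):
--         ans[i] += n - lower(scnt, p - cnt[i])
--         if 2 * cnt[i] >= p:
--             ans[i] -= 1
--
--     return sum(ans) // 2
-- ===== SOURCE B (Python) =====
-- def count_possible_suspect_pairs(n, p, coders):
--     cnt = [0] * n
--     mp = {}
--     for x, y in coders:
--         x -= 1
--         y -= 1
--         key = (min(x, y), max(x, y))
--         mp[key] = mp.get(key, 0) + 1
--         cnt[x] += 1
--         cnt[y] += 1
--     s = sorted(cnt)
--     total = 0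
--     l, r = 0, n - 1
--     while l < r:
--         if s[l] + s[r] >= p:
--             total += r - l
--             r -= 1
--         else:
--             l += 1
--     edges = 0
--     for (x, y), val in mp.items():
--         if cnt[x] + cnt[y] >= p and cnt[x] + cnt[y] - val < p:
--             edges += 1
--     return total - edges
-- ===== Notes on version B (the rewrite author's own statement) =====
-- stated objective: faster
-- what changed: B replaces A's per-node binary-search lookups into the sorted degree list plus a per-node ans array halved at the end by one converging two-pointer sweep over the sorted degrees that counts all qualifying unordered pairs directly, then subtracts a direct count of edges whose pair only qualifies through multiplicity.
import Mathlib
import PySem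

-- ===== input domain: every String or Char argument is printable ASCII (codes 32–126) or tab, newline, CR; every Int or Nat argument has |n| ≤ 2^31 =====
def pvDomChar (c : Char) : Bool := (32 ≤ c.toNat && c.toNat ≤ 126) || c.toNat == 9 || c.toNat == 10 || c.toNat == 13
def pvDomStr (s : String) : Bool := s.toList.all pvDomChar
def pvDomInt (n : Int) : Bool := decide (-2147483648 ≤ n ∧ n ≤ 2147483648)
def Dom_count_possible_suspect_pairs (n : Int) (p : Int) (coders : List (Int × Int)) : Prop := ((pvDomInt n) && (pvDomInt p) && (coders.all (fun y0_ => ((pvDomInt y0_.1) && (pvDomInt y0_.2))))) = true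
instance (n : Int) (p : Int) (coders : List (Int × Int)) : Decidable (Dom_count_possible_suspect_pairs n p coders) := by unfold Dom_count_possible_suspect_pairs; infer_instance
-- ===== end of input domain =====

-- One line: B replaces A's per-node bisect lookups and ans array by a single two-pointer sweep
-- over the sorted degree list plus a direct count of multiplicity-dependent edges; equivalence
-- is about the return value (neither implementation mutates its arguments).

-- ===== PORT A =====
def count_possible_suspect_pairs (n : Int) (p : Int) (coders : List (Int × Int)) : Int :=
  let st := coders.foldl (fun st xy =>
      let x := xy.1 - 1
      let y := xy.2 - 1
      let key := (min x y, max x y)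
      let mp := st.2.modify key 0 (· + 1)
      let c1 := PySem.List.pySetD st.1 x (PySem.List.pyGetD st.1 x 0 + 1)
      let c2 := PySem.List.pySetD c1 y (PySem.List.pyGetD c1 y 0 + 1)
      (c2, mp))
    (List.replicate n.toNat (0:Int), (PySem.Dict.empty : PySem.Dict (Int × Int) Int))
  let cnt := st.1
  let mp := st.2
  let ans1 := mp.items.foldl (fun ans kv =>
      if PySem.List.pyGetD cnt kv.1.1 0 + PySem.List.pyGetD cnt kv.1.2 0 ≥ p ∧
         PySem.List.pyGetD cnt kv.1.1 0 + PySem.List.pyGetD cnt kv.1.2 0 - kv.2 < p then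
        let a1 := PySem.List.pySetD ans kv.1.1 (PySem.List.pyGetD ans kv.1.1 0 - 1)
        PySem.List.pySetD a1 kv.1.2 (PySem.List.pyGetD a1 kv.1.2 0 - 1)
      else ans)
    (List.replicate n.toNat (0:Int))
  let scnt := PySem.List.sorted cnt (fun v => v) false
  let ans2 := (PySem.List.pyRange 0 n 1).foldl (fun ans i =>
      let a1 := PySem.List.pySetD ans i (PySem.List.pyGetD ans i 0 +
                  (n - (PySem.List.bisectLeft scnt (p - PySem.List.pyGetD cnt i 0) : Int)))
      if 2 * PySem.List.pyGetD cnt i 0 ≥ p then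
        PySem.List.pySetD a1 i (PySem.List.pyGetD a1 i 0 - 1)
      else a1)
    ans1
  PySem.Int.floordiv ans2.sum 2

-- ===== PORT B =====
-- while l < r: converging two-pointer sweep of Source B (ported by hand; exact on every input)
def tpLoop (s : List Int) (p : Int) (l r total : Int) : Int :=
  if _h : l < r then
    if PySem.List.pyGetD s l 0 + PySem.List.pyGetD s r 0 ≥ p then
      tpLoop s p l (r - 1) (total + (r - l))
    else
      tpLoop s p (l + 1) r total
  else total
termination_by (r - l).toNat
decreasing_by all_goals omega

def count_possible_suspect_pairs_alt (n : Int) (p : Int) (coders : List (Int × Int)) : Int :=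
  let st := coders.foldl (fun st xy =>
      let x := xy.1 - 1
      let y := xy.2 - 1
      let key := (min x y, max x y)
      let mp := st.2.insert key (st.2.getD key 0 + 1)
      let c1 := PySem.List.pySetD st.1 x (PySem.List.pyGetD st.1 x 0 + 1)
      let c2 := PySem.List.pySetD c1 y (PySem.List.pyGetD c1 y 0 + 1)
      (c2, mp))
    (List.replicate n.toNat (0:Int), (PySem.Dict.empty : PySem.Dict (Int × Int) Int))
  let cnt := st.1
  let mp := st.2
  let s := PySem.List.sorted cnt (fun v => v) false
  let total := tpLoop s p 0 (n - 1) 0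
  let edges := mp.items.foldl (fun e kv =>
      if PySem.List.pyGetD cnt kv.1.1 0 + PySem.List.pyGetD cnt kv.1.2 0 ≥ p ∧
         PySem.List.pyGetD cnt kv.1.1 0 + PySem.List.pyGetD cnt kv.1.2 0 - kv.2 < p then e + 1
      else e) 0
  total - edges

-- ===== PRECONDITION & SPEC =====
-- Pre_ admits exactly the inputs where A returns: every listed suspect index x must satisfy
-- 1 - n ≤ x ≤ n, i.e. the decremented index x-1 is a valid (possibly negative, Python-wrapping)
-- index into the length-n count list; outside this A raises IndexError.
def Pre_count_possible_suspect_pairs (n : Int) (p : Int) (coders : List (Int × Int)) : Prop :=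
  ∀ xy ∈ coders, 1 - n ≤ xy.1 ∧ xy.1 ≤ n ∧ 1 - n ≤ xy.2 ∧ xy.2 ≤ n
instance (n : Int) (p : Int) (coders : List (Int × Int)) : Decidable (Pre_count_possible_suspect_pairs n p coders) := by unfold Pre_count_possible_suspect_pairs; infer_instance
def pvWitness_count_possible_suspect_pairs : Int × Int × (List (Int × Int)) := (3, 2, [(1, 2), (2, 3)])

def Spec_count_possible_suspect_pairs (n : Int) (p : Int) (coders : List (Int × Int)) (out : Int) : Prop := out = count_possible_suspect_pairs_alt n p coders
instance (n : Int) (p : Int) (coders : List (Int × Int)) (out : Int) : Decidable (Spec_count_possible_suspect_pairs n p coders out) := by unfold Spec_count_possible_suspect_pairs; infer_instance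

-- ===== CLAIM (what is proved, stated in full; the proofs are below) =====
def Claim_equal_count_possible_suspect_pairs : Prop := ∀ (n : Int) (p : Int) (coders : List (Int × Int)), Dom_count_possible_suspect_pairs n p coders → Pre_count_possible_suspect_pairs n p coders → Spec_count_possible_suspect_pairs n p coders (count_possible_suspect_pairs n p coders)

-- ===== LEMMAS AND PROOFS =====

-- the per-edge key (min(x-1,y-1), max(x-1,y-1))
def pvKey (xy : Int × Int) : Int × Int := (min (xy.1 - 1) (xy.2 - 1), max (xy.1 - 1) (xy.2 - 1))

-- the cnt-updating part of the shared building loop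
def pvCStep (c : List Int) (xy : Int × Int) : List Int :=
  PySem.List.pySetD (PySem.List.pySetD c (xy.1 - 1) (PySem.List.pyGetD c (xy.1 - 1) 0 + 1))
    (xy.2 - 1) (PySem.List.pyGetD (PySem.List.pySetD c (xy.1 - 1) (PySem.List.pyGetD c (xy.1 - 1) 0 + 1)) (xy.2 - 1) 0 + 1)

-- number of qualifying unordered index pairs, peeling from the head
def pvPairCount (p : Int) : List Int → Nat
  | [] => 0
  | a :: t => t.countP (fun b => decide (p ≤ a + b)) + pvPairCount p t

theorem pvBuildA (coders : List (Int × Int)) (c : List Int) (d : PySem.Dict (Int × Int) Int) :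
    coders.foldl (fun st xy =>
      let x := xy.1 - 1
      let y := xy.2 - 1
      let key := (min x y, max x y)
      let mp := st.2.modify key 0 (· + 1)
      let c1 := PySem.List.pySetD st.1 x (PySem.List.pyGetD st.1 x 0 + 1)
      let c2 := PySem.List.pySetD c1 y (PySem.List.pyGetD c1 y 0 + 1)
      (c2, mp)) (c, d)
    = (coders.foldl pvCStep c, coders.foldl (fun d xy => d.modify (pvKey xy) 0 (· + 1)) d) := by
  induction coders generalizing c d with
  | nil => rfl
  | cons h t ih => simpa using ih (pvCStep c h) (d.modify (pvKey h) 0 (· + 1))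

theorem pvBuildB (coders : List (Int × Int)) (c : List Int) (d : PySem.Dict (Int × Int) Int) :
    coders.foldl (fun st xy =>
      let x := xy.1 - 1
      let y := xy.2 - 1
      let key := (min x y, max x y)
      let mp := st.2.insert key (st.2.getD key 0 + 1)
      let c1 := PySem.List.pySetD st.1 x (PySem.List.pyGetD st.1 x 0 + 1)
      let c2 := PySem.List.pySetD c1 y (PySem.List.pyGetD c1 y 0 + 1)
      (c2, mp)) (c, d)
    = (coders.foldl pvCStep c, coders.foldl (fun d xy => d.insert (pvKey xy) (d.getD (pvKey xy) 0 + 1)) d) := by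
  induction coders generalizing c d with
  | nil => rfl
  | cons h t ih => simpa using ih (pvCStep c h) (d.insert (pvKey h) (d.getD (pvKey h) 0 + 1))

theorem pvLenC (coders : List (Int × Int)) (c : List Int) :
    (coders.foldl pvCStep c).length = c.length := by
  induction coders generalizing c with
  | nil => rfl
  | cons h t ih => simp [ih, pvCStep, PySem.List.length_pySetD]


theorem pvSameMp (coders : List (Int × Int)) :
    (coders.foldl (fun d xy => d.modify (pvKey xy) 0 (· + 1)) (PySem.Dict.empty : PySem.Dict (Int × Int) Int)).items
    = (coders.foldl (fun d xy => d.insert (pvKey xy) (d.getD (pvKey xy) 0 + 1)) (PySem.Dict.empty : PySem.Dict (Int × Int) Int)).items := by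
  have hA : (coders.foldl (fun d xy => d.modify (pvKey xy) 0 (· + 1)) (PySem.Dict.empty : PySem.Dict (Int × Int) Int)).keys.Nodup := by
    exact PySem.Dict.nodup_keys_foldl_modify_key coders pvKey 0 (fun _ _ => (· + 1)) PySem.Dict.empty (by simp [pysem])
  have hB : (coders.foldl (fun d xy => d.insert (pvKey xy) (d.getD (pvKey xy) 0 + 1)) (PySem.Dict.empty : PySem.Dict (Int × Int) Int)).keys.Nodup := by
    exact PySem.Dict.nodup_keys_foldl_insert_key coders pvKey (fun d xy => d.getD (pvKey xy) 0 + 1) PySem.Dict.empty (by simp [pysem])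
  rw [PySem.Dict.items_eq_map_keys _ hA 0, PySem.Dict.items_eq_map_keys _ hB 0]
  have hk : (coders.foldl (fun d xy => d.modify (pvKey xy) 0 (· + 1)) (PySem.Dict.empty : PySem.Dict (Int × Int) Int)).keys
      = (coders.foldl (fun d xy => d.insert (pvKey xy) (d.getD (pvKey xy) 0 + 1)) (PySem.Dict.empty : PySem.Dict (Int × Int) Int)).keys := by
    have h1 : (coders.foldl (fun d xy => d.modify (pvKey xy) 0 (· + 1)) (PySem.Dict.empty : PySem.Dict (Int × Int) Int)).keys
        = PySem.Set.update (PySem.Dict.empty : PySem.Dict (Int × Int) Int).keys (coders.map pvKey) :=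
      PySem.Dict.keys_foldl_modify_key coders pvKey (0:Int) (fun _ _ => (· + 1)) PySem.Dict.empty
    have h2 : (coders.foldl (fun d xy => d.insert (pvKey xy) (d.getD (pvKey xy) 0 + 1)) (PySem.Dict.empty : PySem.Dict (Int × Int) Int)).keys
        = PySem.Set.update (PySem.Dict.empty : PySem.Dict (Int × Int) Int).keys (coders.map pvKey) :=
      PySem.Dict.keys_foldl_insert_key coders pvKey (fun d xy => d.getD (pvKey xy) 0 + 1) PySem.Dict.empty
    exact h1.trans h2.symm
  rw [← hk]
  apply List.map_congr_left
  intro k _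
  have hgA := PySem.Dict.getD_foldl_modify_add_one (coders.map pvKey) (PySem.Dict.empty : PySem.Dict (Int × Int) Int) k
  have hgB := PySem.Dict.getD_foldl_insert_add_one (coders.map pvKey) (PySem.Dict.empty : PySem.Dict (Int × Int) Int) k
  rw [List.foldl_map] at hgA hgB
  rw [hgA, hgB]

theorem pvMpKeys (coders : List (Int × Int)) (k : Int × Int) (v : Int)
    (h : (k, v) ∈ (coders.foldl (fun d xy => d.modify (pvKey xy) 0 (· + 1)) (PySem.Dict.empty : PySem.Dict (Int × Int) Int)).items) :
    ∃ xy ∈ coders, k = pvKey xy := by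
  have hkm := PySem.Dict.mem_keys_of_mem_items _ h
  have h1 : (coders.foldl (fun d xy => d.modify (pvKey xy) 0 (· + 1)) (PySem.Dict.empty : PySem.Dict (Int × Int) Int)).keys
      = PySem.Set.update (PySem.Dict.empty : PySem.Dict (Int × Int) Int).keys (coders.map pvKey) :=
    PySem.Dict.keys_foldl_modify_key coders pvKey (0:Int) (fun _ _ => (· + 1)) PySem.Dict.empty
  rw [h1] at hkm
  simp only [PySem.Dict.keys_empty, PySem.Set.update_nil_left, PySem.Set.mem_ofList, List.mem_map] at hkm
  obtain ⟨xy, hxy, hk⟩ := hkm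
  exact ⟨xy, hxy, hk.symm⟩
theorem pvNormX (l : List Int) (i : Int) (h : PySem.Raise.InRange l.length i) :
    ∃ k : Nat, ∃ hk : k < l.length, (∀ v, PySem.List.pySetD l i v = l.set k v) ∧
      (∀ d, PySem.List.pyGetD l i d = l[k]) := by
  obtain ⟨h1, h2⟩ := h
  by_cases h0 : 0 ≤ i
  · exact ⟨i.toNat, by omega, fun v => PySem.List.pySetD_of_nonneg l v h0, fun d => PySem.List.pyGetD_eq_getElem l d h0 h2⟩
  · refine ⟨l.length - (-i).toNat, by omega, fun v => ?_, fun d => ?_⟩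
    · simp only [PySem.List.pySetD, PySem.List.pySet?, PySem.List.pyIdx?, if_neg h0, if_pos h1]; rfl
    · simp only [PySem.List.pyGetD, PySem.List.pyGet?, PySem.List.pyIdx?, if_neg h0, if_pos h1]
      simp only [Option.bind_some]
      rw [List.getElem?_eq_getElem (by omega)]; rfl

theorem pvSumSet (l : List Int) (k : Nat) (h : k < l.length) (v : Int) :
    (l.set k v).sum = l.sum - l[k] + v := by
  rw [List.sum_set]
  have h2 := List.sum_take_add_sum_drop l k
  rw [List.drop_eq_getElem_cons h] at h2
  simp only [List.sum_cons] at h2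
  simp only [h, if_pos]
  omega

theorem pvSumBump (l : List Int) (i : Int) (v : Int) (h : PySem.Raise.InRange l.length i) :
    (PySem.List.pySetD l i v).sum = l.sum - PySem.List.pyGetD l i 0 + v := by
  obtain ⟨k, hk, hs, hg⟩ := pvNormX l i h
  rw [hs, hg, pvSumSet l k hk]

theorem pvEdge (p : Int) (cnt : List Int) (items : List ((Int × Int) × Int)) :
    ∀ (ans : List Int),
    (∀ kv ∈ items, PySem.Raise.InRange ans.length kv.1.1 ∧ PySem.Raise.InRange ans.length kv.1.2) →
    (items.foldl (fun ans kv =>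
      if PySem.List.pyGetD cnt kv.1.1 0 + PySem.List.pyGetD cnt kv.1.2 0 ≥ p ∧
         PySem.List.pyGetD cnt kv.1.1 0 + PySem.List.pyGetD cnt kv.1.2 0 - kv.2 < p then
        let a1 := PySem.List.pySetD ans kv.1.1 (PySem.List.pyGetD ans kv.1.1 0 - 1)
        PySem.List.pySetD a1 kv.1.2 (PySem.List.pyGetD a1 kv.1.2 0 - 1)
      else ans) ans).sum
    = ans.sum - 2 * (items.countP (fun kv =>
        decide (PySem.List.pyGetD cnt kv.1.1 0 + PySem.List.pyGetD cnt kv.1.2 0 ≥ p ∧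
          PySem.List.pyGetD cnt kv.1.1 0 + PySem.List.pyGetD cnt kv.1.2 0 - kv.2 < p)) : Int) := by
  induction items with
  | nil => intro ans _; simp
  | cons kv t ih =>
    intro ans hr
    obtain ⟨hx, hy⟩ := hr kv (by simp)
    simp only [List.foldl_cons, List.countP_cons]
    by_cases hc : PySem.List.pyGetD cnt kv.1.1 0 + PySem.List.pyGetD cnt kv.1.2 0 ≥ p ∧
        PySem.List.pyGetD cnt kv.1.1 0 + PySem.List.pyGetD cnt kv.1.2 0 - kv.2 < p
    · rw [if_pos hc]
      have hl1 : (PySem.List.pySetD ans kv.1.1 (PySem.List.pyGetD ans kv.1.1 0 - 1)).length = ans.length :=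
        PySem.List.length_pySetD ..
      have hl2 : (PySem.List.pySetD (PySem.List.pySetD ans kv.1.1 (PySem.List.pyGetD ans kv.1.1 0 - 1)) kv.1.2
          (PySem.List.pyGetD (PySem.List.pySetD ans kv.1.1 (PySem.List.pyGetD ans kv.1.1 0 - 1)) kv.1.2 0 - 1)).length = ans.length := by
        rw [PySem.List.length_pySetD, hl1]
      rw [ih _ (by intro kv' h'; rw [hl2]; exact hr kv' (by simp [h']))]
      rw [pvSumBump _ _ _ (by rw [hl1]; exact hy), pvSumBump _ _ _ hx]
      simp only [hc, and_self, decide_true, if_true]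
      push_cast
      ring
    · rw [if_neg hc]
      rw [ih _ (by intro kv' h'; exact hr kv' (by simp [h']))]
      simp only [hc, decide_false]
      simp

theorem pvLoop2 (n p : Int) (cnt scnt : List Int) (m : Nat) (l : List Int)
    (hl : ∀ i ∈ l, 0 ≤ i ∧ i < (m : Int)) :
    ∀ (ans : List Int), ans.length = m →
    (l.foldl (fun ans i =>
      let a1 := PySem.List.pySetD ans i (PySem.List.pyGetD ans i 0 +
                  (n - (PySem.List.bisectLeft scnt (p - PySem.List.pyGetD cnt i 0) : Int)))
      if 2 * PySem.List.pyGetD cnt i 0 ≥ p then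
        PySem.List.pySetD a1 i (PySem.List.pyGetD a1 i 0 - 1)
      else a1) ans).sum
    = ans.sum + (l.map (fun i =>
        (n - (PySem.List.bisectLeft scnt (p - PySem.List.pyGetD cnt i 0) : Int)) -
        (if 2 * PySem.List.pyGetD cnt i 0 ≥ p then 1 else 0))).sum := by
  induction l with
  | nil => intro ans _; simp
  | cons i t ih =>
    intro ans hlen
    have hi := hl i (by simp)
    have hir : PySem.Raise.InRange ans.length i := by constructor <;> omega
    have hl1 : (PySem.List.pySetD ans i (PySem.List.pyGetD ans i 0 +
        (n - (PySem.List.bisectLeft scnt (p - PySem.List.pyGetD cnt i 0) : Int)))).length = ans.length :=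
      PySem.List.length_pySetD ..
    simp only [List.foldl_cons, List.map_cons, List.sum_cons]
    by_cases hc : 2 * PySem.List.pyGetD cnt i 0 ≥ p
    · rw [if_pos hc]
      rw [ih (fun j hj => hl j (by simp [hj])) _ (by rw [PySem.List.length_pySetD, hl1, hlen])]
      rw [pvSumBump _ _ _ (by rw [hl1]; exact hir), pvSumBump _ _ _ hir]
      rw [if_pos hc]
      ring
    · rw [if_neg hc]
      rw [ih (fun j hj => hl j (by simp [hj])) _ (by rw [hl1, hlen])]
      rw [pvSumBump _ _ _ hir]
      rw [if_neg hc]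
      ring
theorem pvBisect (cnt : List Int) (n : Int) (hn : 0 ≤ n) (hlen : cnt.length = n.toNat) (t : Int) :
    n - (PySem.List.bisectLeft (PySem.List.sorted cnt (fun v => v) false) t : Int)
    = (cnt.countP (fun v => decide (t ≤ v)) : Int) := by
  set s := PySem.List.sorted cnt (fun v => v) false with hs
  have hsp : List.Pairwise (· ≤ ·) s := by
    have := PySem.List.sorted_pairwise cnt (fun v => v)
    simpa using this
  obtain ⟨hble, hlt, hge⟩ := PySem.List.bisectLeft_spec s t hsp
  set b := PySem.List.bisectLeft s t with hb
  have hperm : s.Perm cnt := PySem.List.sorted_perm cnt (fun v => v) false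
  have hslen : s.length = cnt.length := hperm.length_eq
  have hcnt : s.countP (fun v => decide (t ≤ v)) = s.length - b := by
    conv_lhs => rw [← List.take_append_drop b s]
    rw [List.countP_append]
    have h1 : (s.take b).countP (fun v => decide (t ≤ v)) = 0 := by
      rw [List.countP_eq_zero]
      intro a ha
      obtain ⟨j, hj, hja⟩ := List.mem_iff_getElem.mp ha
      have hjb : j < b := by rw [List.length_take] at hj; omega
      rw [List.getElem_take] at hja
      have := hlt j (by omega) hjb
      simp only [← hja]
      simp only [decide_eq_true_eq]
      omega
    have h2 : (s.drop b).countP (fun v => decide (t ≤ v)) = (s.drop b).length := by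
      rw [List.countP_eq_length]
      intro a ha
      obtain ⟨j, hj, hja⟩ := List.mem_iff_getElem.mp ha
      rw [List.getElem_drop] at hja
      have := hge (b + j) (by simp at hj; omega) (by omega)
      simp only [← hja, decide_eq_true_eq]
      omega
    rw [h1, h2]
    simp
  have : cnt.countP (fun v => decide (t ≤ v)) = s.countP (fun v => decide (t ≤ v)) :=
    (hperm.countP_eq _).symm
  rw [this, hcnt]
  rw [hslen] at hble ⊢
  omega

theorem pvDouble (p : Int) (c : List Int) :
    (c.map (fun a => (c.countP (fun b => decide (p ≤ a + b)) : Int))).sum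
    = 2 * (pvPairCount p c : Int) + (c.countP (fun a => decide (p ≤ a + a)) : Int) := by
  induction c with
  | nil => simp [pvPairCount]
  | cons a t ih =>
    have hm : ((a :: t).map (fun x => ((a :: t).countP (fun b => decide (p ≤ x + b)) : Int))) =
        (a :: t).map (fun x => (t.countP (fun b => decide (p ≤ x + b)) : Int)
          + (if decide (p ≤ x + a) = true then (1:Int) else 0)) := by
      apply List.map_congr_left
      intro x _
      rw [List.countP_cons]
      by_cases h : decide (p ≤ x + a) = true <;> simp [h]
    rw [hm]
    simp only [List.map_cons, List.sum_cons]
    rw [PySem.List.sum_map_add_int, PySem.List.sum_map_ite_one_zero, ih]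
    have hswap : t.countP (fun x => decide (p ≤ x + a)) = t.countP (fun b => decide (p ≤ a + b)) :=
      List.countP_congr (by intro x _; rw [Int.add_comm x a])
    rw [hswap]
    simp only [pvPairCount, List.countP_cons]
    push_cast
    by_cases h : decide (p ≤ a + a) = true <;> simp [h] <;> ring

theorem pvPairCountPerm (p : Int) {c c' : List Int} (h : c.Perm c') :
    pvPairCount p c = pvPairCount p c' := by
  induction h with
  | nil => rfl
  | cons x h ih => simp only [pvPairCount, ih, List.Perm.countP_eq _ h]
  | swap x y t =>
    simp only [pvPairCount, List.countP_cons]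
    have : decide (p ≤ y + x) = decide (p ≤ x + y) := by rw [Int.add_comm]
    rw [this]
    omega
  | trans _ _ ih1 ih2 => omega

theorem pvPairCountSnoc (p : Int) (t : List Int) (b : Int) :
    pvPairCount p (t ++ [b]) = t.countP (fun x => decide (p ≤ x + b)) + pvPairCount p t := by
  induction t with
  | nil => simp [pvPairCount]
  | cons a t' ih =>
    simp only [List.cons_append, pvPairCount, List.countP_append, List.countP_cons, ih,
      List.countP_nil]
    have : decide (p ≤ a + b) = decide (p ≤ b + a) := by rw [Int.add_comm]
    simp [this]
    omega

theorem pvMono (s : List Int) (hp : List.Pairwise (· ≤ ·) s) (i j : Nat) (hij : i ≤ j)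
    (hj : j < s.length) : s[i]'(by omega) ≤ s[j] := by
  rcases Nat.lt_or_ge i j with h | h
  · exact List.pairwise_iff_getElem.mp hp i j (by omega) hj h
  · have : i = j := by omega
    subst this; rfl

theorem pvTp (s : List Int) (p : Int) (hp : List.Pairwise (· ≤ ·) s) :
    ∀ (k l r : Nat), r - l = k → r < s.length → ∀ acc : Int,
    tpLoop s p (l : Int) (r : Int) acc = acc + (pvPairCount p ((s.drop l).take (r + 1 - l)) : Int) := by
  intro k
  induction k using Nat.strong_induction_on with
  | _ k ih =>
    intro l r hk hr acc
    rw [tpLoop]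
    by_cases hlr : (l : Int) < (r : Int)
    · rw [dif_pos hlr]
      have hlr' : l < r := by exact_mod_cast hlr
      have hl : l < s.length := by omega
      have hgl : PySem.List.pyGetD s (l : Int) 0 = s[l] := by
        rw [PySem.List.pyGetD_eq_getElem s 0 (by omega) (by exact_mod_cast hl)]
        simp
      have hgr : PySem.List.pyGetD s (r : Int) 0 = s[r] := by
        rw [PySem.List.pyGetD_eq_getElem s 0 (by omega) (by exact_mod_cast hr)]
        simp
      rw [hgl, hgr]
      have hdlen : (s.drop l).length = s.length - l := by simp
      by_cases hc : s[l] + s[r] ≥ p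
      · rw [if_pos hc]
        have hr1 : ((r : Int) - 1) = ((r - 1 : Nat) : Int) := by omega
        rw [hr1, ih ((r-1) - l) (by omega) l (r-1) rfl (by omega) _]
        have hseg : (s.drop l).take (r + 1 - l) = (s.drop l).take (r - l) ++ [s[r]] := by
          have h1 : r + 1 - l = (r - l) + 1 := by omega
          rw [h1, List.take_add_one]
          have : (s.drop l)[r - l]? = some s[r] := by
            rw [List.getElem?_eq_getElem (by omega)]
            congr 1
            rw [List.getElem_drop]
            congr 1
            omega
          rw [this]
          rfl
        rw [hseg, pvPairCountSnoc]
        have hcount : (List.countP (fun x => decide (p ≤ x + s[r])) ((s.drop l).take (r - l))) = r - l := by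
          have hlen : ((s.drop l).take (r - l)).length = r - l := by
            rw [List.length_take]
            omega
          conv_rhs => rw [← hlen]
          rw [List.countP_eq_length]
          intro a ha
          obtain ⟨j, hj, hja⟩ := List.mem_iff_getElem.mp ha
          rw [List.getElem_take, List.getElem_drop] at hja
          have hjlen : j < r - l := by rw [List.length_take] at hj; omega
          have h1 : s[l] ≤ s[l + j]'(by omega) := pvMono s hp l (l + j) (by omega) (by omega)
          rw [hja] at h1
          simp only [decide_eq_true_eq]
          omega
        rw [hcount]
        have hseg2 : r - 1 + 1 - l = r - l := by omega
        rw [hseg2]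
        push_cast [Nat.cast_sub (le_of_lt hlr')]
        ring
      · rw [if_neg hc]
        have hl1 : ((l : Int) + 1) = ((l + 1 : Nat) : Int) := by omega
        rw [hl1, ih (r - (l+1)) (by omega) (l+1) r rfl hr _]
        have hseg : (s.drop l).take (r + 1 - l) = s[l] :: (s.drop (l+1)).take (r + 1 - (l+1)) := by
          rw [List.drop_eq_getElem_cons hl]
          have h1 : r + 1 - l = (r + 1 - (l+1)) + 1 := by omega
          rw [h1, List.take_succ_cons]
        rw [hseg]
        simp only [pvPairCount]
        have hz : List.countP (fun b => decide (p ≤ s[l] + b)) ((s.drop (l+1)).take (r + 1 - (l+1))) = 0 := by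
          rw [List.countP_eq_zero]
          intro a ha
          obtain ⟨j, hj, hja⟩ := List.mem_iff_getElem.mp ha
          rw [List.getElem_take, List.getElem_drop] at hja
          have hjb : j < r - l := by rw [List.length_take] at hj; omega
          have h1 : s[l + 1 + j]'(by omega) ≤ s[r] := pvMono s hp (l + 1 + j) r (by omega) hr
          rw [hja] at h1
          simp only [decide_eq_true_eq]
          omega
        rw [hz]
        push_cast
        ring
    · rw [dif_neg hlr]
      have : pvPairCount p ((s.drop l).take (r + 1 - l)) = 0 := by
        have hlen : ((s.drop l).take (r + 1 - l)).length ≤ 1 := by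
          rw [List.length_take]
          have : r ≤ l := by exact_mod_cast not_lt.mp hlr
          omega
        match hm : (s.drop l).take (r + 1 - l), hlen with
        | [], _ => rfl
        | [a], _ => simp [pvPairCount]
      rw [this]
      simp

theorem pvEdgeLen (p : Int) (cnt : List Int) (items : List ((Int × Int) × Int)) :
    ∀ (ans : List Int),
    (items.foldl (fun ans kv =>
      if PySem.List.pyGetD cnt kv.1.1 0 + PySem.List.pyGetD cnt kv.1.2 0 ≥ p ∧
         PySem.List.pyGetD cnt kv.1.1 0 + PySem.List.pyGetD cnt kv.1.2 0 - kv.2 < p then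
        let a1 := PySem.List.pySetD ans kv.1.1 (PySem.List.pyGetD ans kv.1.1 0 - 1)
        PySem.List.pySetD a1 kv.1.2 (PySem.List.pyGetD a1 kv.1.2 0 - 1)
      else ans) ans).length = ans.length := by
  induction items with
  | nil => intro ans; rfl
  | cons kv t ih =>
    intro ans
    simp only [List.foldl_cons]
    by_cases hc : PySem.List.pyGetD cnt kv.1.1 0 + PySem.List.pyGetD cnt kv.1.2 0 ≥ p ∧
        PySem.List.pyGetD cnt kv.1.1 0 + PySem.List.pyGetD cnt kv.1.2 0 - kv.2 < p
    · rw [if_pos hc, ih]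
      simp [PySem.List.length_pySetD]
    · rw [if_neg hc, ih]

theorem pvMapRange (c : List Int) (F : Int → Int) :
    (PySem.List.pyRange 0 (c.length : Int) 1).map (fun j => F (PySem.List.pyGetD c j 0)) = c.map F := by
  have h := PySem.List.map_pyGetD_pyRange_zero' c 0
  calc (PySem.List.pyRange 0 (c.length : Int) 1).map (fun j => F (PySem.List.pyGetD c j 0))
      = ((PySem.List.pyRange 0 (c.length : Int) 1).map (fun j => PySem.List.pyGetD c j 0)).map F := by
        rw [List.map_map]; rfl
    _ = c.map F := by rw [h]

theorem pvSumMapSub (xs : List Int) (f g : Int → Int) :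
    (xs.map (fun x => f x - g x)).sum = (xs.map f).sum - (xs.map g).sum := by
  induction xs with
  | nil => simp
  | cons a t ih => simp only [List.map_cons, List.sum_cons, ih]; ring

-- ===== VERDICT (by name: the statement is the Claim_ definition above) =====
theorem count_possible_suspect_pairs_spec : Claim_equal_count_possible_suspect_pairs := by
  intro n p coders _hdom hpre
  unfold Spec_count_possible_suspect_pairs count_possible_suspect_pairs count_possible_suspect_pairs_alt
  have hA := pvBuildA coders (List.replicate n.toNat (0:Int)) PySem.Dict.empty
  have hB := pvBuildB coders (List.replicate n.toNat (0:Int)) PySem.Dict.empty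
  simp only [hA, hB]
  set c := coders.foldl pvCStep (List.replicate n.toNat (0:Int)) with hcdef
  rw [← pvSameMp coders]
  set items := (coders.foldl (fun d xy => d.modify (pvKey xy) 0 (· + 1)) (PySem.Dict.empty : PySem.Dict (Int × Int) Int)).items with hitems
  have hlenc : c.length = n.toNat := by
    rw [hcdef, pvLenC, List.length_replicate]
  rcases le_or_gt n 0 with hn | hn
  · -- n ≤ 0: Pre_ forces coders = [], everything is empty and both sides are 0
    have hcoders : coders = [] := by
      cases coders with
      | nil => rfl
      | cons xy t =>
        obtain ⟨h1, h2, _, _⟩ := hpre xy (by simp)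
        omega
    subst hcoders
    have hz : n.toNat = 0 := by omega
    have hr : PySem.List.pyRange 0 n = [] := PySem.List.pyRange_one_eq_nil hn
    rw [tpLoop]
    rw [dif_neg (by omega : ¬ (0:Int) < n - 1)]
    simp [hitems, hcdef, hz, hr, PySem.Dict.empty]
  · -- 1 ≤ n
    have hn0 : (0:Int) ≤ n := by omega
    have hmn : ((n.toNat : Int)) = n := Int.toNat_of_nonneg hn0
    -- edge predicate count
    set E := (items.countP (fun kv =>
        decide (PySem.List.pyGetD c kv.1.1 0 + PySem.List.pyGetD c kv.1.2 0 ≥ p ∧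
          PySem.List.pyGetD c kv.1.1 0 + PySem.List.pyGetD c kv.1.2 0 - kv.2 < p)) : Int) with hE
    -- keys of the edge dict are valid (possibly negative) indices
    have hkeys : ∀ kv ∈ items, PySem.Raise.InRange (List.replicate n.toNat (0:Int)).length kv.1.1 ∧
        PySem.Raise.InRange (List.replicate n.toNat (0:Int)).length kv.1.2 := by
      intro kv hkv
      obtain ⟨xy, hxy, hk⟩ := pvMpKeys coders kv.1 kv.2 (by rw [← hitems]; exact hkv)
      obtain ⟨ha1, ha2, hb1, hb2⟩ := hpre xy hxy
      rw [List.length_replicate]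
      constructor <;> (rw [hk]; simp only [pvKey]; constructor <;> omega)
    have hedge := pvEdge p c items (List.replicate n.toNat (0:Int)) hkeys
    have hsum1 : (items.foldl (fun ans kv =>
        if PySem.List.pyGetD c kv.1.1 0 + PySem.List.pyGetD c kv.1.2 0 ≥ p ∧
           PySem.List.pyGetD c kv.1.1 0 + PySem.List.pyGetD c kv.1.2 0 - kv.2 < p then
          let a1 := PySem.List.pySetD ans kv.1.1 (PySem.List.pyGetD ans kv.1.1 0 - 1)
          PySem.List.pySetD a1 kv.1.2 (PySem.List.pyGetD a1 kv.1.2 0 - 1)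
        else ans) (List.replicate n.toNat (0:Int))).sum = 0 - 2 * E := by
      rw [hedge, ← hE]
      simp
    have hlen1 : (items.foldl (fun ans kv =>
        if PySem.List.pyGetD c kv.1.1 0 + PySem.List.pyGetD c kv.1.2 0 ≥ p ∧
           PySem.List.pyGetD c kv.1.1 0 + PySem.List.pyGetD c kv.1.2 0 - kv.2 < p then
          let a1 := PySem.List.pySetD ans kv.1.1 (PySem.List.pyGetD ans kv.1.1 0 - 1)
          PySem.List.pySetD a1 kv.1.2 (PySem.List.pyGetD a1 kv.1.2 0 - 1)
        else ans) (List.replicate n.toNat (0:Int))).length = n.toNat := by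
      rw [pvEdgeLen, List.length_replicate]
    have hloop := pvLoop2 n p c (PySem.List.sorted c (fun v => v) false) n.toNat
      (PySem.List.pyRange 0 n)
      (by intro i hi
          have := (PySem.List.mem_pyRange_one).mp hi
          constructor
          · omega
          · rw [hmn]; omega)
      _ hlen1
    rw [hloop, hsum1]
    -- evaluate the per-node sum via the bisect characterisation and double counting
    have hmap : (PySem.List.pyRange 0 n).map (fun i =>
        (n - (PySem.List.bisectLeft (PySem.List.sorted c (fun v => v) false) (p - PySem.List.pyGetD c i 0) : Int)) -
        (if 2 * PySem.List.pyGetD c i 0 ≥ p then 1 else 0))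
        = c.map (fun a =>
        (n - (PySem.List.bisectLeft (PySem.List.sorted c (fun v => v) false) (p - a) : Int)) -
        (if 2 * a ≥ p then 1 else 0)) := by
      rw [show PySem.List.pyRange 0 n = PySem.List.pyRange 0 (c.length : Int) by rw [hlenc, hmn]]
      exact pvMapRange c (fun a =>
        (n - (PySem.List.bisectLeft (PySem.List.sorted c (fun v => v) false) (p - a) : Int)) -
        (if 2 * a ≥ p then 1 else 0))
    rw [hmap]
    have hpt : ∀ a ∈ c, ((n - (PySem.List.bisectLeft (PySem.List.sorted c (fun v => v) false) (p - a) : Int)) -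
        (if 2 * a ≥ p then 1 else 0))
        = (fun a => ((c.countP (fun b => decide (p ≤ a + b)) : Int)
            - (if decide (p ≤ a + a) = true then (1:Int) else 0))) a := by
      intro a _
      simp only
      rw [pvBisect c n hn0 hlenc (p - a)]
      have h1 : c.countP (fun v => decide (p - a ≤ v)) = c.countP (fun b => decide (p ≤ a + b)) :=
        List.countP_congr (by intro x _; simp only [decide_eq_true_eq]; omega)
      rw [h1]
      congr 1
      by_cases h : p ≤ a + a
      · rw [if_pos (by omega), if_pos (by simp [h])]
      · rw [if_neg (by omega), if_neg (by simp [h])]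
    rw [List.map_congr_left hpt]
    rw [pvSumMapSub c (fun a => (c.countP (fun b => decide (p ≤ a + b)) : Int))
      (fun a => (if decide (p ≤ a + a) = true then (1:Int) else 0))]
    rw [pvDouble p c, PySem.List.sum_map_ite_one_zero]
    -- A's value is now floordiv (2 * (pairs - E)) 2
    rw [show (0 - 2 * E + (2 * (pvPairCount p c : Int) + (c.countP (fun a => decide (p ≤ a + a)) : Int)
        - (c.countP (fun a => decide (p ≤ a + a)) : Int))) = 2 * ((pvPairCount p c : Int) - E) by ring]
    rw [PySem.Int.floordiv_eq_ediv_of_pos (by norm_num : (0:Int) < 2)]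
    rw [Int.mul_ediv_cancel_left _ (by norm_num : (2:Int) ≠ 0)]
    -- B's side: two-pointer = pair count, edge fold = E
    have hsp : List.Pairwise (· ≤ ·) (PySem.List.sorted c (fun v => v) false) := by
      simpa using PySem.List.sorted_pairwise c (fun v => v)
    have hslen : (PySem.List.sorted c (fun v => v) false).length = n.toNat :=
      ((PySem.List.sorted_perm c (fun v => v) false).length_eq).trans hlenc
    have hm1 : 1 ≤ n.toNat := by omega
    have htp := pvTp (PySem.List.sorted c (fun v => v) false) p hsp (n.toNat - 1) 0 (n.toNat - 1)
      (by omega) (by omega) 0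
    rw [show ((0:Nat) : Int) = (0:Int) by simp] at htp
    rw [show (n - 1 : Int) = ((n.toNat - 1 : Nat) : Int) by omega]
    rw [htp]
    rw [List.drop_zero, show n.toNat - 1 + 1 - 0 = (PySem.List.sorted c (fun v => v) false).length by omega,
      List.take_length]
    rw [pvPairCountPerm p (PySem.List.sorted_perm c (fun v => v) false)]
    rw [PySem.List.foldl_ite_add_one (fun kv : (Int × Int) × Int =>
        PySem.List.pyGetD c kv.1.1 0 + PySem.List.pyGetD c kv.1.2 0 ≥ p ∧
        PySem.List.pyGetD c kv.1.1 0 + PySem.List.pyGetD c kv.1.2 0 - kv.2 < p) items 0]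
    rw [← hE]
    ring
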